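-- pv_equiv track=rewrite | github.com/seminss/algorithm-study | hyejinkwon/Programmers/최고의 집합.py | solution
-- ===== SOURCE A (Python) =====
-- def solution(n, s):
--     answer = []
--     combi = []
--
--     if n > s : return [-1]
--
--     for i in range(n) :
--         combi.append(s//n)
--
--     if s%n != 0 :
--         for i in range(1,s%n+1) :
--             combi[n-i] += 1
--
--     answer = combi
--
--     return answer
-- ===== SOURCE B (Python) =====
-- def solution(n, s):
--     if n > s:
--         return [-1]
--     out = []
--     while n >= 1:
--         top = -(-s // n)   # largest remaining element = ceil(s / n)
--         out.append(top)
--         s -= top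
--         n -= 1
--     out.reverse()
--     return out
-- ===== Notes on version B (the rewrite author's own statement) =====
-- stated objective: alternative
-- what changed: B replaces A's fill-with-s//n-then-bump-the-last-r-slots scheme by a greedy peeling loop: repeatedly emit the largest element as ceil(remaining_s/remaining_n), subtract it from s, decrement n, and reverse the accumulated list at the end; no global divmod into runs and no index bumping.
import Mathlib
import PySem

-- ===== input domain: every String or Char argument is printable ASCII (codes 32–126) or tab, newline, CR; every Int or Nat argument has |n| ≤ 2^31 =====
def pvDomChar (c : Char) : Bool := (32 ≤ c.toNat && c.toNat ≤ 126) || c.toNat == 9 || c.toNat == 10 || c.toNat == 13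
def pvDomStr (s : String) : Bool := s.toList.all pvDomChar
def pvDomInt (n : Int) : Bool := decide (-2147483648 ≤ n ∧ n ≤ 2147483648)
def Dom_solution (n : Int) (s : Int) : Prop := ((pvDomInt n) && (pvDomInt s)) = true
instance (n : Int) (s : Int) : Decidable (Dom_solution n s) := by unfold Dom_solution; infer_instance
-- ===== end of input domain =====

-- B replaces A's fill-then-bump construction by a greedy peeling loop that repeatedly
-- emits the largest element ceil(s/n) of the remaining sum and reverses at the end.

-- ===== PORT A =====
def solution (n : Int) (s : Int) : List Int :=
  if n > s then [-1]
  else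
    let combi := (PySem.List.pyRange 0 n 1).foldl
      (fun acc _ => acc ++ [PySem.Int.floordiv s n]) []
    if PySem.Int.mod s n ≠ 0 then
      (PySem.List.pyRange 1 (PySem.Int.mod s n + 1) 1).foldl
        (fun acc i => PySem.List.pySetD acc (n - i) (PySem.List.pyGetD acc (n - i) 0 + 1)) combi
    else combi

-- ===== PORT B =====
-- B's while loop (fuel = number of remaining iterations = n.toNat): each step peels
-- top = ceil(s/n), written -(-s//n) exactly as in Source B, appends it and moves to (n-1, s-top).
def solutionAltLoop (fuel : Nat) (n : Int) (s : Int) (out : List Int) : List Int :=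
  match fuel with
  | 0 => out
  | fuel + 1 =>
      if n ≥ 1 then
        solutionAltLoop fuel (n - 1) (s - -(PySem.Int.floordiv (-s) n))
          (out ++ [-(PySem.Int.floordiv (-s) n)])
      else out

def solution_alt (n : Int) (s : Int) : List Int :=
  if n > s then [-1]
  else (solutionAltLoop n.toNat n s []).reverse

-- ===== PRECONDITION & SPEC =====
-- Pre_ excludes exactly n = 0 with 0 ≤ s, where Python A raises ZeroDivisionError at s//n
-- (for n = 0, s < 0 the 'n > s' guard returns first).
def Pre_solution (n : Int) (s : Int) : Prop := ¬ (n = 0 ∧ 0 ≤ s)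
instance (n : Int) (s : Int) : Decidable (Pre_solution n s) := by unfold Pre_solution; infer_instance
def pvWitness_solution : Int × Int := (3, 11)

def Spec_solution (n : Int) (s : Int) (out : List Int) : Prop := out = solution_alt n s
instance (n : Int) (s : Int) (out : List Int) : Decidable (Spec_solution n s out) := by unfold Spec_solution; infer_instance

-- ===== CLAIM (what is proved, stated in full; the proofs are below) =====
def Claim_equal_solution : Prop := ∀ (n : Int) (s : Int), Dom_solution n s → Pre_solution n s → Spec_solution n s (solution n s)

-- ===== LEMMAS AND PROOFS =====

theorem foldl_append_const {α : Type} (q : α) (l : List Int) (acc : List α) :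
    l.foldl (fun acc _ => acc ++ [q]) acc = acc ++ List.replicate l.length q := by
  induction l generalizing acc with
  | nil => simp
  | cons x xs ih =>
      simp [List.foldl, ih, List.replicate_succ]

-- A's first loop builds a replicate.
theorem fill_eq_replicate (n : Int) (q : Int) :
    (PySem.List.pyRange 0 n 1).foldl (fun acc _ => acc ++ [q]) [] = List.replicate n.toNat q := by
  rw [foldl_append_const]
  simp [PySem.List.length_pyRange_one]

theorem set_replicate_append {α : Type} (q v : α) (m : Nat) (t : List α) :
    (List.replicate (m + 1) q ++ t).set m v = List.replicate m q ++ v :: t := by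
  induction m with
  | zero => simp
  | succ m ih =>
      rw [List.replicate_succ, List.cons_append, List.set_cons_succ, ih,
        List.replicate_succ (n := m), List.cons_append]

-- A's bump loop on a replicate produces the two runs.
theorem bump_loop (n : Nat) (q : Int) (k : Nat) (hk : k ≤ n) :
    (PySem.List.pyRange 1 ((k : Int) + 1) 1).foldl
      (fun acc i => PySem.List.pySetD acc ((n : Int) - i) (PySem.List.pyGetD acc ((n : Int) - i) 0 + 1))
      (List.replicate n q)
    = List.replicate (n - k) q ++ List.replicate k (q + 1) := by
  induction k with
  | zero =>
      rw [PySem.List.pyRange_one_eq_nil (by omega)]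
      simp
  | succ k ih =>
      have hk' : k ≤ n := Nat.le_of_succ_le hk
      have hsplit : PySem.List.pyRange 1 ((k : Int) + 1 + 1) 1
          = PySem.List.pyRange 1 ((k : Int) + 1) 1 ++ [(k : Int) + 1] :=
        PySem.List.pyRange_one_succ_right (a := 1) (b := (k : Int) + 1) (by omega)
      rw [show ((k + 1 : Nat) : Int) + 1 = (k : Int) + 1 + 1 by omega, hsplit,
        List.foldl_append, ih hk']
      simp only [List.foldl]
      set L := List.replicate (n - k) q ++ List.replicate k (q + 1) with hL
      have hidx : (n : Int) - ((k : Int) + 1) = ((n - k - 1 : Nat) : Int) := by omega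
      have hget : PySem.List.pyGetD L ((n : Int) - ((k : Int) + 1)) 0 = q := by
        rw [hidx, PySem.List.pyGetD_natCast]
        have h1 : n - k - 1 < (List.replicate (n - k) q).length := by simp; omega
        rw [List.getD_eq_getElem?_getD, List.getElem?_append_left (by simpa using h1),
          List.getElem?_replicate, if_pos (by omega : n - k - 1 < n - k)]
        rfl
      rw [hget, hidx, PySem.List.pySetD_natCast, hL]
      have hrep : List.replicate (n - k) q = List.replicate ((n - k - 1) + 1) q := by
        congr 1; omega
      rw [hrep, set_replicate_append]
      have : n - (k + 1) = n - k - 1 := by omega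
      rw [this, List.replicate_succ]

-- ceil(s/n) for n > 0, written -(-s // n) with Python floor division
theorem top_eq0 (n s : Int) (hn : 0 < n) (hr : s % n = 0) :
    -(PySem.Int.floordiv (-s) n) = s / n := by
  rw [PySem.Int.neg_floordiv_neg_eq_iff_of_pos (hb := hn)]
  have h1 := Int.mul_ediv_add_emod s n
  have e1 : (s / n - 1) * n = n * (s / n) - n := by ring
  have e2 : (s / n) * n = n * (s / n) := by ring
  omega

theorem top_eq1 (n s : Int) (hn : 0 < n) (hr : s % n ≠ 0) :
    -(PySem.Int.floordiv (-s) n) = s / n + 1 := by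
  rw [PySem.Int.neg_floordiv_neg_eq_iff_of_pos (hb := hn)]
  have h1 := Int.mul_ediv_add_emod s n
  have h2 := Int.emod_nonneg s (by omega : n ≠ 0)
  have h3 := Int.emod_lt_of_pos s hn
  have e1 : (s / n + 1 - 1) * n = n * (s / n) := by ring
  have e2 : (s / n + 1) * n = n * (s / n) + n := by ring
  omega

-- B's loop emits the reversed two-run list.
theorem alt_loop_eq (k : Nat) (n s : Int) (out : List Int) (hn : 0 < n) (hk : n.toNat = k) :
    solutionAltLoop k n s out
      = out ++ List.replicate (s % n).toNat (s / n + 1)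
            ++ List.replicate (n - s % n).toNat (s / n) := by
  induction k generalizing n s out with
  | zero => omega
  | succ k ih =>
      rw [solutionAltLoop, if_pos (by omega : n ≥ 1)]
      have h1 := Int.mul_ediv_add_emod s n
      have h2 := Int.emod_nonneg s (by omega : n ≠ 0)
      have h3 := Int.emod_lt_of_pos s hn
      by_cases hn1 : n = 1
      · -- last iteration: the recursive call has fuel k = 0 and returns its accumulator
        subst hn1
        have hk0 : k = 0 := by omega
        subst hk0
        rw [top_eq0 1 s one_pos (Int.emod_one s), solutionAltLoop]
        simp
      · have hn' : 0 < n - 1 := by omega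
        by_cases hr : s % n = 0
        · -- top = s / n; remaining sum is (s/n) * (n-1)
          rw [top_eq0 n s hn hr]
          have hdm : (s - s / n) / (n - 1) = s / n ∧ (s - s / n) % (n - 1) = 0 := by
            rw [Int.ediv_emod_unique hn']
            refine ⟨by nlinarith [h1], by omega, by omega⟩
          rw [ih (n - 1) _ _ hn' (by omega), hdm.1, hdm.2]
          simp [hr]
          conv_rhs => rw [show n.toNat = (n.toNat - 1) + 1 by omega, List.replicate_succ]
        · -- top = s / n + 1; remainder drops by one, quotient unchanged
          rw [top_eq1 n s hn hr]
          have hdm : (s - (s / n + 1)) / (n - 1) = s / n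
              ∧ (s - (s / n + 1)) % (n - 1) = s % n - 1 := by
            rw [Int.ediv_emod_unique hn']
            refine ⟨by nlinarith [h1], by omega, by omega⟩
          rw [ih (n - 1) _ _ hn' (by omega), hdm.1, hdm.2]
          have hrepl : List.replicate (s % n).toNat (s / n + 1)
              = (s / n + 1) :: List.replicate (s % n - 1).toNat (s / n + 1) := by
            rw [show (s % n).toNat = (s % n - 1).toNat + 1 by omega, List.replicate_succ]
          simp [hrepl]

-- ===== VERDICT (by name: the statement is the Claim_ definition above) =====
theorem solution_spec : Claim_equal_solution := by
  intro n s _ hpre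
  unfold Spec_solution solution solution_alt
  by_cases hg : n > s
  · simp [hg]
  · simp only [if_neg hg]
    have hns : n ≤ s := not_lt.mp hg
    have hn0 : n ≠ 0 := by
      intro h; exact hpre ⟨h, by omega⟩
    rw [fill_eq_replicate]
    rcases lt_or_gt_of_ne hn0 with hneg | hpos
    · -- n < 0: A produces the empty list; B's loop has no fuel
      have hr := PySem.Int.mod_neg_bounds s (b := n) hneg
      have hrep : n.toNat = 0 := by omega
      have hB : solutionAltLoop n.toNat n s [] = [] := by
        rw [hrep, solutionAltLoop]
      rw [hB]
      by_cases hr0 : PySem.Int.mod s n = 0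
      · simp [hr0, hrep]
      · rw [if_pos hr0, PySem.List.pyRange_one_eq_nil (by omega)]
        simp [hrep]
    · -- n > 0: both sides are the two-run list
      have hmod := PySem.Int.mod_eq_emod_of_pos (a := s) hpos
      have hdiv := PySem.Int.floordiv_eq_ediv_of_pos (a := s) hpos
      have h2 := Int.emod_nonneg s (by omega : n ≠ 0)
      have h3 := Int.emod_lt_of_pos s hpos
      rw [alt_loop_eq n.toNat n s [] hpos rfl, hmod, hdiv]
      by_cases hr : s % n = 0
      · simp [hr]
      · rw [if_pos hr]
        have hbump := bump_loop n.toNat (s / n) (s % n).toNat (by omega)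
        rw [show (((s % n).toNat : Nat) : Int) = s % n by omega,
          show ((n.toNat : Nat) : Int) = n by omega] at hbump
        rw [hbump]
        simp [List.reverse_append, show n.toNat - (s % n).toNat = (n - s % n).toNat by omega]
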